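-- pv_equiv track=rewrite | github.com/SamuelKupferschmid/hashcode-2020-prep | 02_slideshow/mateusz/my_cleanup.py | create_buckets_simple
-- ===== SOURCE A (Python) =====
-- PHOTO_ID = 0
--
-- PHOTO_NUMBER_OF_TAGS = 2
--
-- def create_buckets_simple(photos_list):
--     buckets = {}
--
--     for photo in photos_list:
--         n = photo[PHOTO_NUMBER_OF_TAGS]
--
--         if n in buckets.keys():
--             buckets[n].append(photo[PHOTO_ID])
--         else:
--             buckets[n] = []
--             buckets[n].append(photo[PHOTO_ID])
--
--     return buckets
-- ===== SOURCE B (Python) =====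
-- PHOTO_ID = 0
--
-- PHOTO_NUMBER_OF_TAGS = 2
--
-- def create_buckets_simple(photos_list):
--     keys = dict.fromkeys([p[PHOTO_NUMBER_OF_TAGS] for p in photos_list])
--     return {n: [p[PHOTO_ID] for p in photos_list
--                 if p[PHOTO_NUMBER_OF_TAGS] == n]
--             for n in keys}
-- ===== Notes on version B (the rewrite author's own statement) =====
-- stated objective: alternative
-- what changed: Replaces A's single incremental dict-building pass (append-or-create per photo) by a key-first decomposition: compute the distinct tag counts in first-occurrence order, then build each bucket with one comprehension scanning the list per key.
import Mathlib
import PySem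

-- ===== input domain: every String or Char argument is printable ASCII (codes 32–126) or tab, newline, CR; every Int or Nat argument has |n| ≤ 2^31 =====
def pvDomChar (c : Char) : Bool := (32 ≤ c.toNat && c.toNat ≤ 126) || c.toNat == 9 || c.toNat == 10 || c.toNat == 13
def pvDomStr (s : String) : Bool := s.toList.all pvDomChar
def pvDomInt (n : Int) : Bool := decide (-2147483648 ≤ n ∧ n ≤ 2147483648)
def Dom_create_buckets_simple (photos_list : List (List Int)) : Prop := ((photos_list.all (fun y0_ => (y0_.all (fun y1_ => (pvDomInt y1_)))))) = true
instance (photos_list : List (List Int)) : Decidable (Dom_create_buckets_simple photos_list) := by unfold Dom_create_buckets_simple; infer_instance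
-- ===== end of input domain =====

-- B replaces A's incremental dict-building pass by a key-first decomposition (dedup the tag
-- counts, then one per-key scan); alternative structure, not claimed faster.


-- ===== PORT A =====
-- photo[2] / photo[0] are in range on every input admitted by Pre_ below, so they are
-- ported as pyGetD with an unused default.
def create_buckets_simple (photos_list : List (List Int)) : List (Int × List Int) :=
  (photos_list.foldl
    (fun (buckets : PySem.Dict Int (List Int)) photo =>
      let n := PySem.List.pyGetD photo 2 0
      if buckets.contains n then
        buckets.modify n [] (fun l => l ++ [PySem.List.pyGetD photo 0 0])
      else
        (buckets.insert n []).modify n [] (fun l => l ++ [PySem.List.pyGetD photo 0 0]))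
    PySem.Dict.empty).items

-- ===== PORT B =====
def create_buckets_simple_alt (photos_list : List (List Int)) : List (Int × List Int) :=
  let keys := PySem.List.dedup (photos_list.map (fun p => PySem.List.pyGetD p 2 0))
  keys.map (fun n =>
    (n, (photos_list.filter (fun p => PySem.List.pyGetD p 2 0 == n)).map
          (fun p => PySem.List.pyGetD p 0 0)))

-- ===== PRECONDITION & SPEC =====
-- Pre_ excludes exactly the inputs on which A raises IndexError (a photo with fewer than
-- 3 fields); B raises there too.
def Pre_create_buckets_simple (photos_list : List (List Int)) : Prop :=
  ∀ p ∈ photos_list, 3 ≤ p.length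
instance (photos_list : List (List Int)) : Decidable (Pre_create_buckets_simple photos_list) := by unfold Pre_create_buckets_simple; infer_instance

def pvWitness_create_buckets_simple : List (List Int) := [[1, 5, 2], [3, 0, 2], [4, 1, 1]]

def Spec_create_buckets_simple (photos_list : List (List Int)) (out : List (Int × List Int)) : Prop := out = create_buckets_simple_alt photos_list
instance (photos_list : List (List Int)) (out : List (Int × List Int)) : Decidable (Spec_create_buckets_simple photos_list out) := by unfold Spec_create_buckets_simple; infer_instance

-- ===== CLAIM (what is proved, stated in full; the proofs are below) =====
def Claim_equal_create_buckets_simple : Prop := ∀ (photos_list : List (List Int)), Dom_create_buckets_simple photos_list → Pre_create_buckets_simple photos_list → Spec_create_buckets_simple photos_list (create_buckets_simple photos_list)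

-- ===== LEMMAS AND PROOFS =====

-- A's two branches (append to an existing bucket / create-then-append) are both
-- 'buckets[n] = buckets.get(n, []) + [v]', i.e. a single Dict.modify.
theorem step_eq (d : PySem.Dict Int (List Int)) (n : Int) (v : Int) :
    (if d.contains n then d.modify n [] (fun l => l ++ [v])
     else (d.insert n []).modify n [] (fun l => l ++ [v]))
      = d.modify n [] (fun l => l ++ [v]) := by
  by_cases h : d.contains n
  · simp [h]
  · rw [if_neg (by simp [h])]
    have h1 : ∀ p ∈ d.items, p.1 ≠ n := by
      intro p hp hpn
      have hm : n ∈ d.keys := by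
        simp only [PySem.Dict.keys]; exact List.mem_map.mpr ⟨p, hp, hpn⟩
      rw [← PySem.Dict.contains_iff_mem_keys] at hm
      simp [h] at hm
    have h' : d.contains n = false := by simpa using h
    have hmk : PySem.Dict.mk (d.items ++ [(n, ([] : List Int))]) = d.insert n [] := by
      apply PySem.Dict.ext
      simp [PySem.Dict.insert, h']
    simp only [PySem.Dict.modify, PySem.Dict.insert, h', Bool.false_eq_true, ↓reduceIte,
      PySem.Dict.contains_mk, List.any_append, List.any_cons, BEq.rfl, List.any_nil, Bool.or_false,
      Bool.or_true, beq_iff_eq, List.map_append, List.map_cons, List.map_nil, PySem.Dict.mk.injEq,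
      List.append_singleton_inj, Prod.mk.injEq, List.append_cancel_right_eq, true_and]
    refine ⟨?_, ?_⟩
    · calc _ = List.map id d.items := List.map_congr_left (by intro p hp; simp [h1 p hp])
        _ = d.items := List.map_id d.items
    · rw [hmk, PySem.Dict.getD_insert_self, PySem.Dict.getD_of_not_contains _ _ h']

theorem create_buckets_simple_spec : Claim_equal_create_buckets_simple := by
  intro photos _ _
  unfold Spec_create_buckets_simple create_buckets_simple create_buckets_simple_alt
  rw [PySem.List.foldl_congr_mem _ _
      (fun (d : PySem.Dict Int (List Int)) p =>
        d.modify (PySem.List.pyGetD p 2 0) [] (fun l => l ++ [PySem.List.pyGetD p 0 0])) _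
      (fun acc x _ => step_eq acc _ _)]
  set d := photos.foldl
      (fun (d : PySem.Dict Int (List Int)) p =>
        d.modify (PySem.List.pyGetD p 2 0) [] (fun l => l ++ [PySem.List.pyGetD p 0 0]))
      PySem.Dict.empty with hd
  have hnd : d.keys.Nodup := by
    apply PySem.Dict.nodup_keys_foldl_modify_key photos
      (fun p => PySem.List.pyGetD p 2 0) [] (fun _ p => (fun l => l ++ [PySem.List.pyGetD p 0 0]))
    simp [PySem.Dict.keys_empty]
  have hkeys : d.keys = PySem.List.dedup (photos.map (fun p => PySem.List.pyGetD p 2 0)) := by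
    rw [hd, PySem.Dict.keys_foldl_modify_key photos
      (fun p => PySem.List.pyGetD p 2 0) [] (fun _ p => (fun l => l ++ [PySem.List.pyGetD p 0 0]))]
    simp [PySem.Dict.keys_empty, PySem.List.dedup_eq_ofList, PySem.Set.update, PySem.Set.ofList]
  have hget : ∀ c, d.getD c [] =
      (photos.filter (fun p => PySem.List.pyGetD p 2 0 == c)).map
        (fun p => PySem.List.pyGetD p 0 0) := by
    intro c
    have hmap : d = (photos.map (fun p => (PySem.List.pyGetD p 2 0, PySem.List.pyGetD p 0 0))).foldl
        (fun d q => d.modify q.1 [] (fun l => l ++ [q.2])) PySem.Dict.empty := by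
      rw [List.foldl_map]
    rw [hmap, PySem.Dict.getD_foldl_modify_append]
    simp [List.filter_map, Function.comp_def]
  rw [PySem.Dict.items_eq_map_keys d hnd [], hkeys]
  exact List.map_congr_left (fun k _ => by rw [hget k])
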